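-- pv_equiv track=rewrite | github.com/hosung-222/Coding-Test | 프로그래머스/2/250136. ［PCCP 기출문제］ 2번 ／ 석유 시추/［PCCP 기출문제］ 2번 ／ 석유 시추.py | solution
-- ===== SOURCE A (Python) =====
-- from collections import deque
--
-- def solution(land):
--     n, m = len(land), len(land[0])
--     dx = [-1,0,1,0]
--     dy = [0,-1,0,1]
--     visit =[[0]*m for _ in range(n)]
--     result = [0 for _ in range(m+1)]
--
--     def bfs(a,b):
--         count = 0
--         visit[a][b] = 1
--         q = deque()
--         q.append((a,b))
--         min_oil, max_oil = b, b
--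
--         while q:
--             x, y = q.popleft()
--             min_oil = min(y, min_oil)
--             max_oil = max(y, max_oil)
--             count += 1
--             for i in range(4):
--                 nx = x + dx[i]
--                 ny = y + dy[i]
--                 if nx < 0 or nx >= n or ny < 0 or ny >= m:
--                     continue
--                 if visit[nx][ny]!= 1 and land[nx][ny] == 1:
--                     visit[nx][ny] = 1
--                     q.append((nx,ny))
--
--         for i in range(min_oil, max_oil+1):
--             result[i] += count
--
--     for i in range(len(land)):
--         for j in range(len(land[0])):
--             if land[i][j] == 1 and visit[i][j] == 0:
--                 bfs(i, j)
--
--     return max(result)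
-- ===== SOURCE B (Python) =====
-- def solution(land):
--     n, m = len(land), len(land[0])
--
--     def oilcell(a, b):
--         return 0 <= a < n and 0 <= b < m and land[a][b] == 1
--
--     def comp(v):
--         # component of v as a set, by saturating neighbour expansion
--         s = {v}
--         for _ in range(n * m):
--             t = set(s)
--             for (x, y) in s:
--                 for w in ((x - 1, y), (x, y - 1), (x + 1, y), (x, y + 1)):
--                     if oilcell(*w):
--                         t.add(w)
--             if len(t) == len(s):
--                 break
--             s = t
--         return s
--
--     result = [0] * (m + 1)
--     seen = set()
--     for i in range(n):
--         for j in range(m):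
--             if land[i][j] == 1 and (i, j) not in seen:
--                 c = comp((i, j))
--                 seen |= c
--                 size = len(c)
--                 cols = [y for (_, y) in c]
--                 for col in range(min(cols), max(cols) + 1):
--                     result[col] += size
--     return max(result)
-- ===== Notes on version B (the rewrite author's own statement) =====
-- stated objective: alternative
-- what changed: A flood-fills each component with a BFS queue, a mutable visit matrix and incrementally tracked count/min/max; B computes each component as a set by iterating a neighbour-saturation step to its fixpoint, keeps a seen set instead of the visit matrix, and takes size and column span from the finished set.
import Mathlib
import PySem

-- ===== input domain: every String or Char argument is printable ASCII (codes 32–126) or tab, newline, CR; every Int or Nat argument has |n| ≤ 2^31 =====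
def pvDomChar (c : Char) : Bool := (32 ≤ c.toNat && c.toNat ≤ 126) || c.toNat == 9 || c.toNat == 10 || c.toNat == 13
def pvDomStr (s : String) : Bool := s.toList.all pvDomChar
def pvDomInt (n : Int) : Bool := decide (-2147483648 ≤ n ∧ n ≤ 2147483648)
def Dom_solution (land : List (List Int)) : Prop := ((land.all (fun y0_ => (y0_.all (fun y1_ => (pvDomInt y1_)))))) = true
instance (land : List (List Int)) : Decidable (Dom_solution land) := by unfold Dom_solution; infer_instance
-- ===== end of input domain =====

-- B replaces A's queue-based BFS with visit-matrix bookkeeping by a per-component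
-- set-saturation (fixpoint) flood fill over a seen-set (objective: alternative; not faster).

-- ===== PORT A =====

-- land[i][j] / visit[i][j] (all uses are guarded in range, where getD is exact)
def pvGet2 (xs : List (List Int)) (i j : Int) : Int :=
  (xs.getD i.toNat []).getD j.toNat 0

-- visit[i][j] = 1
def pvSet2 (xs : List (List Int)) (i j : Int) : List (List Int) :=
  xs.set i.toNat ((xs.getD i.toNat []).set j.toNat 1)

-- dx = [-1,0,1,0], dy = [0,-1,0,1], paired
def pvDirs : List (Int × Int) := [(-1, 0), (0, -1), (1, 0), (0, 1)]

-- one iteration of A's 'for i in range(4)' neighbour loop, state = (visit, q)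
def pvNb (land : List (List Int)) (n m x y : Int)
    (st : List (List Int) × List (Int × Int)) (d : Int × Int) :
    List (List Int) × List (Int × Int) :=
  let nx := x + d.1
  let ny := y + d.2
  if nx < 0 ∨ nx ≥ n ∨ ny < 0 ∨ ny ≥ m then st
  else if pvGet2 st.1 nx ny ≠ 1 ∧ pvGet2 land nx ny = 1 then
    (pvSet2 st.1 nx ny, st.2 ++ [(nx, ny)])
  else st

-- A's 'while q' loop (fuel makes the recursion structural; it never runs out on admitted inputs)
def pvBfsLoop (land : List (List Int)) (n m : Int) :
    Nat → List (List Int) → List (Int × Int) → Int → Int → Int →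
    List (List Int) × Int × Int × Int
  | 0, visit, _, cnt, mn, mx => (visit, cnt, mn, mx)
  | _ + 1, visit, [], cnt, mn, mx => (visit, cnt, mn, mx)
  | fuel + 1, visit, (x, y) :: q, cnt, mn, mx =>
    let st := pvDirs.foldl (pvNb land n m x y) (visit, q)
    pvBfsLoop land n m fuel st.1 st.2 (cnt + 1) (min y mn) (max y mx)

-- A's bfs(a, b): returns the updated (visit, result)
def pvBfs (land : List (List Int)) (n m a b : Int)
    (visit : List (List Int)) (result : List Int) :
    List (List Int) × List Int :=
  let visit := pvSet2 visit a b
  let r := pvBfsLoop land n m (n.toNat * m.toNat + 1) visit [(a, b)] 0 b b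
  (r.1,
   (PySem.List.pyRange r.2.2.1 (r.2.2.2 + 1) 1).foldl
     (fun res i => PySem.List.pySetD res i (PySem.List.pyGetD res i 0 + r.2.1)) result)

def solution (land : List (List Int)) : Int :=
  let n : Int := land.length
  let m : Int := (land.headD []).length
  let visit0 : List (List Int) := List.replicate n.toNat (List.replicate m.toNat (0 : Int))
  let result0 : List Int := List.replicate (m.toNat + 1) (0 : Int)
  let st := (PySem.List.pyRange 0 n 1).foldl (fun st i =>
      (PySem.List.pyRange 0 m 1).foldl (fun st j =>
        if pvGet2 land i j = 1 ∧ pvGet2 st.1 i j = 0 then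
          pvBfs land n m i j st.1 st.2
        else st) st) (visit0, result0)
  (PySem.List.max? st.2 (fun y => y)).getD 0

-- ===== PORT B =====

-- B's oilcell(a, b)
def pvOil (land : List (List Int)) (n m a b : Int) : Bool :=
  decide (0 ≤ a) && decide (a < n) && decide (0 ≤ b) && decide (b < m)
    && (pvGet2 land a b == 1)

-- B's neighbour tuple
def pvNbrs (x y : Int) : List (Int × Int) :=
  [(x - 1, y), (x, y - 1), (x + 1, y), (x, y + 1)]

-- one saturation round: t = set(s) plus every oil neighbour of an element of s
def pvStep (land : List (List Int)) (n m : Int)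
    (s : PySem.Set (Int × Int)) : PySem.Set (Int × Int) :=
  s.foldl (fun t p =>
    (pvNbrs p.1 p.2).foldl (fun t w =>
      if pvOil land n m w.1 w.2 then PySem.Set.add t w else t) t) s

-- B's comp loop: iterate the round, stopping at the fixpoint (len(t) == len(s))
def pvIter (land : List (List Int)) (n m : Int) :
    Nat → PySem.Set (Int × Int) → PySem.Set (Int × Int)
  | 0, s => s
  | fuel + 1, s =>
    let t := pvStep land n m s
    if t.length == s.length then s else pvIter land n m fuel t

def solution_alt (land : List (List Int)) : Int :=
  let n : Int := land.length
  let m : Int := (land.headD []).length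
  let result0 : List Int := List.replicate (m.toNat + 1) (0 : Int)
  let st := (PySem.List.pyRange 0 n 1).foldl (fun st i =>
      (PySem.List.pyRange 0 m 1).foldl (fun st j =>
        if pvGet2 land i j = 1 ∧ (i, j) ∉ st.1 then
          let c := pvIter land n m (n.toNat * m.toNat) [(i, j)]
          let size : Int := c.length
          let cols := c.map (·.2)
          (PySem.Set.union st.1 c,
           (PySem.List.pyRange ((PySem.List.min? cols (fun y => y)).getD 0)
               ((PySem.List.max? cols (fun y => y)).getD 0 + 1) 1).foldl
             (fun res col => PySem.List.pySetD res col (PySem.List.pyGetD res col 0 + size)) st.2)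
        else st) st) (([] : PySem.Set (Int × Int)), result0)
  (PySem.List.max? st.2 (fun y => y)).getD 0

-- ===== PRECONDITION & SPEC =====
-- Pre_ excludes the inputs on which Python A raises IndexError: the empty grid
-- (len(land[0])) and grids where some row is shorter than the first row.
def Pre_solution (land : List (List Int)) : Prop :=
  land ≠ [] ∧ ∀ row ∈ land, (land.headD []).length ≤ row.length
instance (land : List (List Int)) : Decidable (Pre_solution land) := by
  unfold Pre_solution; infer_instance

def pvWitness_solution : List (List Int) := [[1, 0], [1, 1]]

def Spec_solution (land : List (List Int)) (out : Int) : Prop := out = solution_alt land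
instance (land : List (List Int)) (out : Int) : Decidable (Spec_solution land out) := by
  unfold Spec_solution; infer_instance

-- ===== CLAIM (what is proved, stated in full; the proofs are below) =====
def Claim_equal_solution : Prop :=
  ∀ (land : List (List Int)), Dom_solution land → Pre_solution land →
    Spec_solution land (solution land)

-- ===== LEMMAS AND PROOFS =====

-- ===== proof-side definitions =====

def OilP (land : List (List Int)) (n m : Int) (p : Int × Int) : Prop :=
  pvOil land n m p.1 p.2 = true

def AdjP (land : List (List Int)) (n m : Int) (p q : Int × Int) : Prop :=
  OilP land n m p ∧ OilP land n m q ∧ q ∈ pvNbrs p.1 p.2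

def ReachP (land : List (List Int)) (n m : Int) (p q : Int × Int) : Prop :=
  Relation.ReflTransGen (AdjP land n m) p q

noncomputable def GridF (n m : Int) : Finset (Int × Int) :=
  Finset.Icc 0 (n - 1) ×ˢ Finset.Icc 0 (m - 1)

theorem card_GridF (n m : Int) :
    (GridF n m).card = n.toNat * m.toNat := by
  unfold GridF
  rw [Finset.card_product, Int.card_Icc, Int.card_Icc]
  have h1 : (n - 1 + 1 - 0).toNat = n.toNat := by omega
  have h2 : (m - 1 + 1 - 0).toNat = m.toNat := by omega
  rw [h1, h2]

theorem oil_mem_GridF (land : List (List Int)) (n m : Int) (p : Int × Int)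
    (h : OilP land n m p) : p ∈ GridF n m := by
  simp only [OilP, pvOil, Bool.and_eq_true, decide_eq_true_eq] at h
  simp [GridF, Finset.mem_Icc]
  omega

theorem oilP_iff (land : List (List Int)) (n m : Int) (i j : Int)
    (hi0 : 0 ≤ i) (hin : i < n) (hj0 : 0 ≤ j) (hjm : j < m) :
    OilP land n m (i, j) ↔ pvGet2 land i j = 1 := by
  simp [OilP, pvOil, hi0, hin, hj0, hjm]

theorem mem_pvNbrs_symm (p q : Int × Int) (h : q ∈ pvNbrs p.1 p.2) :
    p ∈ pvNbrs q.1 q.2 := by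
  obtain ⟨a, b⟩ := p; obtain ⟨c, d⟩ := q
  simp only [pvNbrs, List.mem_cons, List.not_mem_nil, or_false, Prod.mk.injEq] at h ⊢
  rcases h with ⟨h1, h2⟩ | ⟨h1, h2⟩ | ⟨h1, h2⟩ | ⟨h1, h2⟩ <;> omega

theorem adjP_symm (land : List (List Int)) (n m : Int) (p q : Int × Int)
    (h : AdjP land n m p q) : AdjP land n m q p :=
  ⟨h.2.1, h.1, mem_pvNbrs_symm _ _ h.2.2⟩

theorem reachP_symm (land : List (List Int)) (n m : Int) (p q : Int × Int)
    (h : ReachP land n m p q) : ReachP land n m q p := by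
  induction h with
  | refl => exact Relation.ReflTransGen.refl
  | tail _ hadj ih =>
    exact Relation.ReflTransGen.head (adjP_symm _ _ _ _ _ hadj) ih

-- ===== B-side: the saturation computes the component =====

theorem mem_nbrFold (land : List (List Int)) (n m : Int) (ws : List (Int × Int))
    (t : PySem.Set (Int × Int)) (y : Int × Int) :
    y ∈ ws.foldl (fun t w =>
        if pvOil land n m w.1 w.2 then PySem.Set.add t w else t) t ↔
      y ∈ t ∨ (y ∈ ws ∧ pvOil land n m y.1 y.2 = true) := by
  induction ws generalizing t with
  | nil => simp
  | cons w ws ih =>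
    simp only [List.foldl_cons, List.mem_cons]
    rw [ih]
    by_cases h : pvOil land n m w.1 w.2 = true
    · simp [h, PySem.Set.mem_add]
      constructor
      · rintro ((hy | rfl) | hy) <;> tauto
      · rintro (hy | ⟨(rfl | hy), ho⟩) <;> tauto
    · simp [h]
      constructor
      · rintro (hy | hy) <;> tauto
      · rintro (hy | ⟨(rfl | hy), ho⟩) <;> tauto

theorem nodup_nbrFold (land : List (List Int)) (n m : Int) (ws : List (Int × Int))
    (t : PySem.Set (Int × Int)) (h : t.Nodup) :
    (ws.foldl (fun t w =>
        if pvOil land n m w.1 w.2 then PySem.Set.add t w else t) t).Nodup := by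
  induction ws generalizing t with
  | nil => exact h
  | cons w ws ih =>
    simp only [List.foldl_cons]
    apply ih
    split
    · exact PySem.Set.nodup_add _ _ h
    · exact h

theorem mem_pvStep (land : List (List Int)) (n m : Int) (s : PySem.Set (Int × Int))
    (y : Int × Int) :
    y ∈ pvStep land n m s ↔
      y ∈ s ∨ (∃ p ∈ s, y ∈ pvNbrs p.1 p.2 ∧ pvOil land n m y.1 y.2 = true) := by
  unfold pvStep
  suffices h : ∀ (l : List (Int × Int)) (acc : PySem.Set (Int × Int)),
      y ∈ l.foldl (fun t p => (pvNbrs p.1 p.2).foldl (fun t w =>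
          if pvOil land n m w.1 w.2 then PySem.Set.add t w else t) t) acc ↔
        y ∈ acc ∨ (∃ p ∈ l, y ∈ pvNbrs p.1 p.2 ∧ pvOil land n m y.1 y.2 = true) by
    exact h s s
  intro l
  induction l with
  | nil => simp
  | cons p l ih =>
    intro acc
    simp only [List.foldl_cons, List.mem_cons]
    rw [ih, mem_nbrFold]
    constructor
    · rintro ((hy | ⟨hn', ho⟩) | ⟨q, hq, hn', ho⟩)
      · tauto
      · exact Or.inr ⟨p, Or.inl rfl, hn', ho⟩
      · exact Or.inr ⟨q, Or.inr hq, hn', ho⟩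
    · rintro (hy | ⟨q, (rfl | hq), hn', ho⟩)
      · tauto
      · tauto
      · exact Or.inr ⟨q, hq, hn', ho⟩

theorem nodup_pvStep (land : List (List Int)) (n m : Int) (s : PySem.Set (Int × Int))
    (h : s.Nodup) : (pvStep land n m s).Nodup := by
  unfold pvStep
  suffices hgen : ∀ (l : List (Int × Int)) (acc : PySem.Set (Int × Int)), acc.Nodup →
      (l.foldl (fun t p => (pvNbrs p.1 p.2).foldl (fun t w =>
          if pvOil land n m w.1 w.2 then PySem.Set.add t w else t) t) acc).Nodup by
    exact hgen s s h
  intro l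
  induction l with
  | nil => exact fun acc h => h
  | cons p l ih =>
    intro acc hacc
    simp only [List.foldl_cons]
    exact ih _ (nodup_nbrFold _ _ _ _ _ hacc)

def ClosedS (land : List (List Int)) (n m : Int) (s : List (Int × Int)) : Prop :=
  ∀ p ∈ s, ∀ w : Int × Int, pvOil land n m w.1 w.2 = true → w ∈ pvNbrs p.1 p.2 → w ∈ s

theorem nodup_oil_length_le (land : List (List Int)) (n m : Int)
    (s : List (Int × Int)) (hnd : s.Nodup) (hoil : ∀ p ∈ s, OilP land n m p) :
    s.length ≤ (GridF n m).card := by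
  have hsub : s.toFinset ⊆ GridF n m := by
    intro p hp
    exact oil_mem_GridF land n m p (hoil p (List.mem_toFinset.mp hp))
  calc s.length = s.toFinset.card := (List.toFinset_card_of_nodup hnd).symm
    _ ≤ (GridF n m).card := Finset.card_le_card hsub

theorem pvIter_spec (land : List (List Int)) (n m : Int) :
    ∀ (fuel : ℕ) (s : PySem.Set (Int × Int)),
    s.Nodup → (∀ p ∈ s, OilP land n m p) →
    (GridF n m).card ≤ fuel + s.length →
    (pvIter land n m fuel s).Nodup ∧
    (∀ p ∈ s, p ∈ pvIter land n m fuel s) ∧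
    (∀ p ∈ pvIter land n m fuel s, OilP land n m p) ∧
    (∀ p ∈ pvIter land n m fuel s, ∃ q ∈ s, ReachP land n m q p) ∧
    ClosedS land n m (pvIter land n m fuel s) := by
  intro fuel
  induction fuel with
  | zero =>
    intro s hnd hoil hfuel
    simp only [pvIter]
    refine ⟨hnd, fun p hp => hp, hoil, fun p hp => ⟨p, hp, Relation.ReflTransGen.refl⟩, ?_⟩
    -- fuel 0 is only reached when s already fills the whole grid
    have hlen : s.length ≤ (GridF n m).card := nodup_oil_length_le land n m s hnd hoil
    have hcard : s.toFinset.card = (GridF n m).card := by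
      have := List.toFinset_card_of_nodup hnd
      omega
    have heq : s.toFinset = GridF n m := by
      apply Finset.eq_of_subset_of_card_le
      · intro p hp; exact oil_mem_GridF land n m p (hoil p (List.mem_toFinset.mp hp))
      · omega
    intro p hp w hw hnb
    have : w ∈ GridF n m := oil_mem_GridF land n m w hw
    rw [← heq] at this
    exact List.mem_toFinset.mp this
  | succ fuel ih =>
    intro s hnd hoil hfuel
    have hndt : (pvStep land n m s).Nodup := nodup_pvStep land n m s hnd
    have hsub : ∀ p ∈ s, p ∈ pvStep land n m s := by
      intro p hp; exact (mem_pvStep land n m s p).mpr (Or.inl hp)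
    have hsubF : s.toFinset ⊆ (pvStep land n m s).toFinset := by
      intro p hp; exact List.mem_toFinset.mpr (hsub p (List.mem_toFinset.mp hp))
    have hoilt : ∀ p ∈ pvStep land n m s, OilP land n m p := by
      intro p hp
      rcases (mem_pvStep land n m s p).mp hp with h | ⟨q, hq, hn', ho⟩
      · exact hoil p h
      · exact ho
    by_cases hlen : (pvStep land n m s).length = s.length
    · have hres : pvIter land n m (fuel + 1) s = s := by
        simp [pvIter, hlen]
      rw [hres]
      -- same length and s ⊆ step s: the step adds nothing new
      have hstep_sub : ∀ w ∈ pvStep land n m s, w ∈ s := by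
        have h1 : s.toFinset.card = s.length := List.toFinset_card_of_nodup hnd
        have h2 : (pvStep land n m s).toFinset.card = (pvStep land n m s).length :=
          List.toFinset_card_of_nodup hndt
        have heq : (pvStep land n m s).toFinset = s.toFinset :=
          (Finset.eq_of_subset_of_card_le hsubF (by omega)).symm
        intro w hw
        have := List.mem_toFinset.mpr hw
        rw [heq] at this
        exact List.mem_toFinset.mp this
      refine ⟨hnd, fun p hp => hp, hoil, fun p hp => ⟨p, hp, Relation.ReflTransGen.refl⟩, ?_⟩
      intro p hp w hw hnb
      exact hstep_sub w ((mem_pvStep land n m s w).mpr (Or.inr ⟨p, hp, hnb, hw⟩))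
    · have hres : pvIter land n m (fuel + 1) s = pvIter land n m fuel (pvStep land n m s) := by
        simp [pvIter, hlen]
      rw [hres]
      have hlt : s.length < (pvStep land n m s).length := by
        have h1 : s.toFinset.card = s.length := List.toFinset_card_of_nodup hnd
        have h2 : (pvStep land n m s).toFinset.card = (pvStep land n m s).length :=
          List.toFinset_card_of_nodup hndt
        have := Finset.card_le_card hsubF
        omega
      obtain ⟨a1, a2, a3, a4, a5⟩ := ih (pvStep land n m s) hndt hoilt (by omega)
      refine ⟨a1, fun p hp => a2 p (hsub p hp), a3, ?_, a5⟩
      intro p hp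
      obtain ⟨q, hq, hr⟩ := a4 p hp
      rcases (mem_pvStep land n m s q).mp hq with h | ⟨q', hq', hn', ho⟩
      · exact ⟨q, h, hr⟩
      · exact ⟨q', hq', Relation.ReflTransGen.head ⟨hoil q' hq', ho, hn'⟩ hr⟩

theorem pvComp_spec (land : List (List Int)) (n m : Int)
    (v : Int × Int) (hoil : OilP land n m v) :
    (pvIter land n m (n.toNat * m.toNat) [v]).Nodup ∧
    (∀ w, w ∈ pvIter land n m (n.toNat * m.toNat) [v] ↔ ReachP land n m v w) := by
  have hfuel : (GridF n m).card ≤ n.toNat * m.toNat + ([v] : List (Int × Int)).length := by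
    rw [card_GridF]; simp
  obtain ⟨a1, a2, a3, a4, a5⟩ := pvIter_spec land n m (n.toNat * m.toNat) [v]
    (List.nodup_singleton v) (by simpa using hoil) hfuel
  refine ⟨a1, fun w => ⟨?_, ?_⟩⟩
  · intro hw
    obtain ⟨q, hq, hr⟩ := a4 w hw
    simp only [List.mem_singleton] at hq
    rwa [hq] at hr
  · intro hr
    induction hr with
    | refl => exact a2 v (by simp)
    | tail _ hadj ihr =>
      exact a5 _ ihr _ hadj.2.1 hadj.2.2

-- ===== A-side: visit matrix =====

def WFv (n m : Int) (visit : List (List Int)) : Prop :=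
  visit.length = n.toNat ∧ ∀ row ∈ visit, row.length = m.toNat ∧ ∀ x ∈ row, x = 0 ∨ x = 1

def VisP (n m : Int) (visit : List (List Int)) (p : Int × Int) : Prop :=
  0 ≤ p.1 ∧ p.1 < n ∧ 0 ≤ p.2 ∧ p.2 < m ∧ pvGet2 visit p.1 p.2 = 1

noncomputable def VisF (n m : Int) (visit : List (List Int)) : Finset (Int × Int) :=
  (GridF n m).filter (fun p => pvGet2 visit p.1 p.2 = 1)

theorem mem_VisF (n m : Int) (visit : List (List Int)) (p : Int × Int) :
    p ∈ VisF n m visit ↔ VisP n m visit p := by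
  simp [VisF, GridF, Finset.mem_filter, Finset.mem_Icc, VisP]
  constructor
  · rintro ⟨⟨⟨h1, h2⟩, h3, h4⟩, h5⟩; exact ⟨h1, by omega, h3, by omega, h5⟩
  · rintro ⟨h1, h2, h3, h4, h5⟩; exact ⟨⟨⟨h1, by omega⟩, h3, by omega⟩, h5⟩

theorem wf_visit0 (n m : Int) :
    WFv n m (List.replicate n.toNat (List.replicate m.toNat (0 : Int))) := by
  refine ⟨by simp, ?_⟩
  intro row hrow
  rw [List.eq_of_mem_replicate hrow]
  exact ⟨by simp, fun x hx => Or.inl (List.eq_of_mem_replicate hx)⟩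

theorem pvGet2_visit0 (n m i j : Int) :
    pvGet2 (List.replicate n.toNat (List.replicate m.toNat (0 : Int))) i j = 0 := by
  simp only [pvGet2, List.getD_eq_getElem?_getD, List.getElem?_replicate]
  split
  · simp only [Option.getD_some, List.getElem?_replicate]
    split <;> simp
  · simp

theorem not_visP_visit0 (n m : Int) (p : Int × Int) :
    ¬ VisP n m (List.replicate n.toNat (List.replicate m.toNat (0 : Int))) p := by
  intro h
  have := pvGet2_visit0 n m p.1 p.2
  have h5 := h.2.2.2.2
  omega

theorem wf_pvSet2 (n m : Int) (visit : List (List Int)) (i j : Int)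
    (hwf : WFv n m visit) (hi2 : i < n) : WFv n m (pvSet2 visit i j) := by
  obtain ⟨hlen, hrow⟩ := hwf
  refine ⟨by simp [pvSet2, hlen], ?_⟩
  intro row hmem
  rcases Nat.lt_or_ge i.toNat visit.length with hilt | hilt
  · rcases List.mem_or_eq_of_mem_set hmem with h | h
    · exact hrow row h
    · subst h
      have hgd : visit.getD i.toNat [] = visit[i.toNat] := List.getD_eq_getElem _ _ hilt
      have hold := hrow _ (List.getElem_mem hilt)
      rw [hgd]
      constructor
      · rw [List.length_set]; exact hold.1
      · intro x hx
        rcases List.mem_or_eq_of_mem_set hx with h2 | h2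
        · exact hold.2 x h2
        · exact Or.inr h2
  · have hv0 : visit.length = 0 := by omega
    have hnil : visit = [] := List.eq_nil_of_length_eq_zero hv0
    subst hnil
    simp [pvSet2] at hmem

theorem pvGet2_pvSet2 (n m : Int) (visit : List (List Int)) (i j a b : Int)
    (hwf : WFv n m visit)
    (hi : 0 ≤ i) (hi2 : i < n) (hj : 0 ≤ j) (hj2 : j < m)
    (ha : 0 ≤ a) (ha2 : a < n) (hb : 0 ≤ b) (hb2 : b < m) :
    pvGet2 (pvSet2 visit i j) a b =
      if a = i ∧ b = j then 1 else pvGet2 visit a b := by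
  obtain ⟨hlen, hrow⟩ := hwf
  have hilt : i.toNat < visit.length := by omega
  have halt : a.toNat < visit.length := by omega
  have hgdI : visit.getD i.toNat [] = visit[i.toNat] := List.getD_eq_getElem _ _ hilt
  have hgdA : visit.getD a.toNat [] = visit[a.toNat] := List.getD_eq_getElem _ _ halt
  have hrli : (visit[i.toNat]).length = m.toNat := (hrow _ (List.getElem_mem hilt)).1
  unfold pvGet2 pvSet2
  rw [hgdI]
  have halt2 : a.toNat < (visit.set i.toNat (visit[i.toNat].set j.toNat 1)).length := by
    rw [List.length_set]; exact halt
  rw [List.getD_eq_getElem _ _ halt2]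
  by_cases hai : a = i
  · subst hai
    rw [List.getElem_set_self (by rw [List.length_set]; exact hilt)]
    have hblt : b.toNat < (visit[a.toNat].set j.toNat 1).length := by
      rw [List.length_set]; omega
    rw [List.getD_eq_getElem _ _ hblt]
    by_cases hbj : b = j
    · subst hbj
      rw [if_pos ⟨rfl, rfl⟩, List.getElem_set_self (by rw [List.length_set]; omega)]
    · rw [if_neg (by tauto), List.getElem_set_ne (by omega)]
      rw [hgdA, List.getD_eq_getElem _ _ (by omega : b.toNat < (visit[a.toNat]).length)]
  · rw [List.getElem_set_ne (by omega)]
    rw [if_neg (by tauto)]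
    rw [hgdA]

theorem visP_pvSet2 (n m : Int) (visit : List (List Int)) (i j : Int) (p : Int × Int)
    (hwf : WFv n m visit)
    (hi : 0 ≤ i) (hi2 : i < n) (hj : 0 ≤ j) (hj2 : j < m) :
    VisP n m (pvSet2 visit i j) p ↔ p = (i, j) ∨ VisP n m visit p := by
  constructor
  · rintro ⟨h1, h2, h3, h4, h5⟩
    rw [pvGet2_pvSet2 n m visit i j p.1 p.2 hwf hi hi2 hj hj2 h1 h2 h3 h4] at h5
    by_cases he : p.1 = i ∧ p.2 = j
    · left; exact Prod.ext he.1 he.2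
    · right
      rw [if_neg he] at h5
      exact ⟨h1, h2, h3, h4, h5⟩
  · rintro (rfl | ⟨h1, h2, h3, h4, h5⟩)
    · refine ⟨hi, hi2, hj, hj2, ?_⟩
      rw [pvGet2_pvSet2 n m visit i j i j hwf hi hi2 hj hj2 hi hi2 hj hj2]
      simp
    · refine ⟨h1, h2, h3, h4, ?_⟩
      rw [pvGet2_pvSet2 n m visit i j p.1 p.2 hwf hi hi2 hj hj2 h1 h2 h3 h4]
      split
      · rfl
      · exact h5

-- ===== A-side: the neighbour fold of one BFS step =====

theorem nbFold_spec (land : List (List Int)) (n m x y : Int) :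
    ∀ (ds : List (Int × Int)) (visit : List (List Int)) (q : List (Int × Int)),
    WFv n m visit →
    ∃ new : List (Int × Int),
      (ds.foldl (pvNb land n m x y) (visit, q)).2 = q ++ new ∧
      WFv n m (ds.foldl (pvNb land n m x y) (visit, q)).1 ∧
      new.Nodup ∧
      (∀ w ∈ new, OilP land n m w ∧ ¬ VisP n m visit w ∧ ∃ d ∈ ds, w = (x + d.1, y + d.2)) ∧
      (∀ p, VisP n m (ds.foldl (pvNb land n m x y) (visit, q)).1 p ↔
        VisP n m visit p ∨ p ∈ new) ∧
      (∀ d ∈ ds, OilP land n m (x + d.1, y + d.2) →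
        VisP n m (ds.foldl (pvNb land n m x y) (visit, q)).1 (x + d.1, y + d.2)) := by
  intro ds
  induction ds with
  | nil =>
    intro visit q hwf
    exact ⟨[], by simp, hwf, List.nodup_nil, by simp, by simp, by simp⟩
  | cons d ds ih =>
    intro visit q hwf
    simp only [List.foldl_cons]
    by_cases hbb : x + d.1 < 0 ∨ x + d.1 ≥ n ∨ y + d.2 < 0 ∨ y + d.2 ≥ m
    · have hst : pvNb land n m x y (visit, q) d = (visit, q) := by
        simp only [pvNb]
        rw [if_pos hbb]
      rw [hst]
      obtain ⟨new, a1, a2, a3, a4, a5, a6⟩ := ih visit q hwf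
      refine ⟨new, a1, a2, a3, fun w hw => ⟨(a4 w hw).1, (a4 w hw).2.1,
        by obtain ⟨dd, hdd, hdw⟩ := (a4 w hw).2.2; exact ⟨dd, List.mem_cons_of_mem _ hdd, hdw⟩⟩,
        a5, ?_⟩
      intro d' hd' hoil
      rcases List.mem_cons.mp hd' with rfl | hd'
      · exfalso
        have := oil_mem_GridF land n m _ hoil
        simp only [GridF, Finset.mem_product, Finset.mem_Icc] at this
        omega
      · exact a6 d' hd' hoil
    · push_neg at hbb
      obtain ⟨hb1, hb2, hb3, hb4⟩ := hbb
      by_cases hg : pvGet2 visit (x + d.1) (y + d.2) ≠ 1 ∧ pvGet2 land (x + d.1) (y + d.2) = 1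
      · have hst : pvNb land n m x y (visit, q) d =
            (pvSet2 visit (x + d.1) (y + d.2), q ++ [(x + d.1, y + d.2)]) := by
          simp only [pvNb]
          rw [if_neg (by omega), if_pos hg]
        rw [hst]
        have hwf' : WFv n m (pvSet2 visit (x + d.1) (y + d.2)) :=
          wf_pvSet2 n m visit _ _ hwf hb2
        obtain ⟨new, a1, a2, a3, a4, a5, a6⟩ := ih _ _ hwf'
        have hoilw : OilP land n m (x + d.1, y + d.2) := by
          rw [oilP_iff land n m _ _ hb1 hb2 hb3 hb4]
          exact hg.2
        have hnvw : ¬ VisP n m visit (x + d.1, y + d.2) := by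
          intro hv
          exact hg.1 hv.2.2.2.2
        have hvisset : ∀ p, VisP n m (pvSet2 visit (x + d.1) (y + d.2)) p ↔
            p = (x + d.1, y + d.2) ∨ VisP n m visit p :=
          fun p => visP_pvSet2 n m visit _ _ p hwf hb1 hb2 hb3 hb4
        refine ⟨(x + d.1, y + d.2) :: new, by simpa using a1, a2, ?_, ?_, ?_, ?_⟩
        · refine List.nodup_cons.mpr ⟨?_, a3⟩
          intro hmem
          exact (a4 _ hmem).2.1 ((hvisset _).mpr (Or.inl rfl))
        · intro w hw
          rcases List.mem_cons.mp hw with rfl | hw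
          · exact ⟨hoilw, hnvw, d, List.mem_cons_self .., rfl⟩
          · obtain ⟨o1, o2, dd, hdd, hdw⟩ := a4 w hw
            refine ⟨o1, ?_, dd, List.mem_cons_of_mem _ hdd, hdw⟩
            intro hv
            exact o2 ((hvisset w).mpr (Or.inr hv))
        · intro p
          rw [a5 p, hvisset p]
          simp only [List.mem_cons]
          tauto
        · intro d' hd' hoil'
          rcases List.mem_cons.mp hd' with rfl | hd'
          · rw [a5]
            exact Or.inl ((hvisset _).mpr (Or.inl rfl))
          · exact a6 d' hd' hoil'
      · have hst : pvNb land n m x y (visit, q) d = (visit, q) := by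
          simp only [pvNb]
          rw [if_neg (by omega), if_neg hg]
        rw [hst]
        obtain ⟨new, a1, a2, a3, a4, a5, a6⟩ := ih visit q hwf
        refine ⟨new, a1, a2, a3, fun w hw => ⟨(a4 w hw).1, (a4 w hw).2.1,
          by obtain ⟨dd, hdd, hdw⟩ := (a4 w hw).2.2; exact ⟨dd, List.mem_cons_of_mem _ hdd, hdw⟩⟩,
          a5, ?_⟩
        intro d' hd' hoil'
        rcases List.mem_cons.mp hd' with rfl | hd'
        · -- guard failed but the cell is oil: it was already visited
          rw [a5]
          left
          refine ⟨hb1, hb2, hb3, hb4, ?_⟩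
          by_contra hne
          apply hg
          constructor
          · exact hne
          · rw [oilP_iff land n m _ _ hb1 hb2 hb3 hb4] at hoil'
            exact hoil'
        · exact a6 d' hd' hoil'

-- ===== A-side: BFS loop invariant =====

theorem mem_nbrs_of_dir (x y : Int) (d : Int × Int) (hd : d ∈ pvDirs) :
    (x + d.1, y + d.2) ∈ pvNbrs x y := by
  simp only [pvDirs, List.mem_cons, List.not_mem_nil, or_false] at hd
  rcases hd with rfl | rfl | rfl | rfl <;> (simp [pvNbrs]; try omega)

theorem dir_of_mem_nbrs (x y : Int) (w : Int × Int) (hw : w ∈ pvNbrs x y) :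
    ∃ d ∈ pvDirs, w = (x + d.1, y + d.2) := by
  simp only [pvNbrs, List.mem_cons, List.not_mem_nil, or_false] at hw
  rcases hw with rfl | rfl | rfl | rfl
  · exact ⟨(-1, 0), by simp [pvDirs], by simp [Prod.ext_iff]; try omega⟩
  · exact ⟨(0, -1), by simp [pvDirs], by simp [Prod.ext_iff]; try omega⟩
  · exact ⟨(1, 0), by simp [pvDirs], by simp [Prod.ext_iff]; try omega⟩
  · exact ⟨(0, 1), by simp [pvDirs], by simp [Prod.ext_iff]; try omega⟩

theorem reach_oil (land : List (List Int)) (n m : Int) (v w : Int × Int)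
    (hv : OilP land n m v) (h : ReachP land n m v w) : OilP land n m w := by
  induction h with
  | refl => exact hv
  | tail _ hadj _ => exact hadj.2.1

theorem closed_reach (land : List (List Int)) (n m : Int)
    (Vis : (Int × Int) → Prop)
    (hclosed : ∀ p, Vis p → ∀ w, AdjP land n m p w → Vis w)
    (p q : Int × Int) (hp : Vis p) (hr : ReachP land n m p q) : Vis q := by
  induction hr with
  | refl => exact hp
  | tail _ hadj ih => exact hclosed _ ih _ hadj

theorem min'_insert_eq (S : Finset Int) (hne : S.Nonempty) (y : Int)
    (hne2 : (insert y S).Nonempty) :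
    min y (S.min' hne) = (insert y S).min' hne2 := by
  apply le_antisymm
  · apply Finset.le_min'
    intro b hb
    rcases Finset.mem_insert.mp hb with rfl | hb
    · exact min_le_left _ _
    · exact le_trans (min_le_right _ _) (Finset.min'_le _ _ hb)
  · rcases min_cases y (S.min' hne) with ⟨heq, _⟩ | ⟨heq, _⟩ <;> rw [heq]
    · exact Finset.min'_le _ _ (Finset.mem_insert_self _ _)
    · exact Finset.min'_le _ _ (Finset.mem_insert_of_mem (S.min'_mem hne))

theorem max'_insert_eq (S : Finset Int) (hne : S.Nonempty) (y : Int)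
    (hne2 : (insert y S).Nonempty) :
    max y (S.max' hne) = (insert y S).max' hne2 := by
  apply le_antisymm
  · rcases max_cases y (S.max' hne) with ⟨heq, _⟩ | ⟨heq, _⟩ <;> rw [heq]
    · exact Finset.le_max' _ _ (Finset.mem_insert_self _ _)
    · exact Finset.le_max' _ _ (Finset.mem_insert_of_mem (S.max'_mem hne))
  · apply Finset.max'_le
    intro b hb
    rcases Finset.mem_insert.mp hb with rfl | hb
    · exact le_max_left _ _
    · exact le_trans (Finset.le_max' _ _ hb) (le_max_right _ _)

theorem min'_congr' (S T : Finset Int) (h : T = S) (hS : S.Nonempty) (hT : T.Nonempty) :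
    S.min' hS = T.min' hT := by subst h; rfl

theorem max'_congr' (S T : Finset Int) (h : T = S) (hS : S.Nonempty) (hT : T.Nonempty) :
    S.max' hS = T.max' hT := by subst h; rfl

def BfsInv (land : List (List Int)) (n m : Int) (v : Int × Int) (V0 : Finset (Int × Int))
    (visit : List (List Int)) (q : List (Int × Int)) (cnt mn mx : Int)
    (P : Finset (Int × Int)) : Prop :=
  WFv n m visit ∧
  (∀ p, VisP n m visit p ↔ p ∈ V0 ∨ p ∈ P ∨ p ∈ q) ∧
  q.Nodup ∧
  (∀ p ∈ q, p ∉ P) ∧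
  (∀ p ∈ q, OilP land n m p ∧ ReachP land n m v p) ∧
  (∀ p ∈ P, OilP land n m p ∧ ReachP land n m v p) ∧
  (∀ p ∈ P, ∀ w, OilP land n m w → w ∈ pvNbrs p.1 p.2 → VisP n m visit w) ∧
  cnt = (P.card : Int) ∧
  mn = ((insert v P).image Prod.snd).min' ((Finset.insert_nonempty v P).image Prod.snd) ∧
  mx = ((insert v P).image Prod.snd).max' ((Finset.insert_nonempty v P).image Prod.snd) ∧
  (v ∈ P ∨ v ∈ q)

theorem bfsLoop_spec (land : List (List Int)) (n m : Int) (v : Int × Int)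
    (V0 : Finset (Int × Int)) :
    ∀ (fuel : ℕ) (visit : List (List Int)) (q : List (Int × Int)) (cnt mn mx : Int)
      (P : Finset (Int × Int)),
    BfsInv land n m v V0 visit q cnt mn mx P →
    q.length + ((GridF n m).card - (VisF n m visit).card) ≤ fuel →
    ∃ P', BfsInv land n m v V0 (pvBfsLoop land n m fuel visit q cnt mn mx).1 []
        (pvBfsLoop land n m fuel visit q cnt mn mx).2.1
        (pvBfsLoop land n m fuel visit q cnt mn mx).2.2.1
        (pvBfsLoop land n m fuel visit q cnt mn mx).2.2.2 P' := by
  intro fuel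
  induction fuel with
  | zero =>
    intro visit q cnt mn mx P hinv hfuel
    have hq : q = [] := by
      have := List.length_eq_zero_iff.mp (by omega : q.length = 0)
      exact this
    subst hq
    exact ⟨P, hinv⟩
  | succ fuel ih =>
    intro visit q cnt mn mx P hinv hfuel
    match q with
    | [] => exact ⟨P, hinv⟩
    | (x, y) :: q' =>
      obtain ⟨hwf, hvis, hnd, hdisj, hq, hP, hcl, hcnt, hmn, hmx, hv⟩ := hinv
      have hxyV : VisP n m visit (x, y) := (hvis (x, y)).mpr (Or.inr (Or.inr (by simp)))
      have hxq := hq (x, y) (by simp)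
      obtain ⟨new, b1, b2, b3, b4, b5, b6⟩ := nbFold_spec land n m x y pvDirs visit q' hwf
      have hstep : pvBfsLoop land n m (fuel + 1) visit ((x, y) :: q') cnt mn mx =
          pvBfsLoop land n m fuel (pvDirs.foldl (pvNb land n m x y) (visit, q')).1
            (pvDirs.foldl (pvNb land n m x y) (visit, q')).2 (cnt + 1) (min y mn) (max y mx) := rfl
      rw [hstep]
      set st := pvDirs.foldl (pvNb land n m x y) (visit, q') with hst
      -- new queue and visit facts
      have hq'sub : ∀ p ∈ q', VisP n m visit p :=
        fun p hp => (hvis p).mpr (Or.inr (Or.inr (by simp [hp])))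
      have hPsub : ∀ p ∈ P, VisP n m visit p :=
        fun p hp => (hvis p).mpr (Or.inr (Or.inl hp))
      -- invariant for the new state
      have hinv' : BfsInv land n m v V0 st.1 st.2 (cnt + 1) (min y mn) (max y mx)
          (insert (x, y) P) := by
        refine ⟨b2, ?_, ?_, ?_, ?_, ?_, ?_, ?_, ?_, ?_, ?_⟩
        · intro p
          rw [b5 p, hvis p, b1]
          simp only [Finset.mem_insert, List.mem_append, List.mem_cons]
          constructor
          · rintro ((h | h | (h | h)) | h) <;> tauto
          · rintro (h | (h | h) | (h | h)) <;> tauto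
        · rw [b1]
          refine List.Nodup.append (List.Nodup.of_cons hnd) b3 ?_
          intro p hp1 hp2
          exact (b4 p hp2).2.1 (hq'sub p hp1)
        · intro p hp
          rw [b1] at hp
          simp only [Finset.mem_insert]
          rcases List.mem_append.mp hp with h | h
          · push_neg
            constructor
            · intro he
              have := List.nodup_cons.mp hnd
              rw [← he] at this
              exact this.1 h
            · exact hdisj p (by simp [h])
          · push_neg
            constructor
            · intro he
              exact (b4 p h).2.1 (he ▸ hxyV)
            · intro hpP
              exact (b4 p h).2.1 (hPsub p hpP)
        · intro p hp
          rw [b1] at hp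
          rcases List.mem_append.mp hp with h | h
          · exact hq p (by simp [h])
          · obtain ⟨ho, hnv, d, hd, hdw⟩ := b4 p h
            refine ⟨ho, ?_⟩
            exact Relation.ReflTransGen.tail hxq.2 ⟨hxq.1, ho, by rw [hdw]; exact mem_nbrs_of_dir x y d hd⟩
        · intro p hp
          rcases Finset.mem_insert.mp hp with rfl | hp
          · exact hxq
          · exact hP p hp
        · intro p hp w how hwnb
          rcases Finset.mem_insert.mp hp with rfl | hp
          · obtain ⟨d, hd, hdw⟩ := dir_of_mem_nbrs x y w hwnb
            rw [hdw]
            exact b6 d hd (by rw [← hdw]; exact how)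
          · have := hcl p hp w how hwnb
            exact (b5 w).mpr (Or.inl this)
        · have hxyP : (x, y) ∉ P := hdisj (x, y) (by simp)
          rw [Finset.card_insert_of_notMem hxyP]
          push_cast
          omega
        · have hS' : Finset.image Prod.snd (insert v (insert (x, y) P)) =
              insert y (Finset.image Prod.snd (insert v P)) := by
            rw [Finset.insert_comm, Finset.image_insert]
          rw [hmn, min'_insert_eq (Finset.image Prod.snd (insert v P))
            ((Finset.insert_nonempty v P).image Prod.snd) y (Finset.insert_nonempty _ _)]
          exact min'_congr' _ _ hS' _ _
        · have hS' : Finset.image Prod.snd (insert v (insert (x, y) P)) =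
              insert y (Finset.image Prod.snd (insert v P)) := by
            rw [Finset.insert_comm, Finset.image_insert]
          rw [hmx, max'_insert_eq (Finset.image Prod.snd (insert v P))
            ((Finset.insert_nonempty v P).image Prod.snd) y (Finset.insert_nonempty _ _)]
          exact max'_congr' _ _ hS' _ _
        · rcases hv with h | h
          · exact Or.inl (Finset.mem_insert_of_mem h)
          · rcases List.mem_cons.mp h with he | h
            · exact Or.inl (by rw [he]; exact Finset.mem_insert_self _ _)
            · exact Or.inr (by rw [b1]; exact List.mem_append_left _ h)
      -- fuel accounting
      have hcard : (VisF n m st.1).card = (VisF n m visit).card + new.length := by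
        have hun : VisF n m st.1 = VisF n m visit ∪ new.toFinset := by
          apply Finset.ext
          intro p
          rw [mem_VisF, b5 p, Finset.mem_union, mem_VisF, List.mem_toFinset]
        rw [hun, Finset.card_union_of_disjoint, List.toFinset_card_of_nodup b3]
        rw [Finset.disjoint_left]
        intro p hp hp2
        exact (b4 p (List.mem_toFinset.mp hp2)).2.1 ((mem_VisF n m visit p).mp hp)
      have hsubG : VisF n m st.1 ⊆ GridF n m := Finset.filter_subset _ _
      have hle : (VisF n m st.1).card ≤ (GridF n m).card := Finset.card_le_card hsubG
      have hlen2 : st.2.length = q'.length + new.length := by rw [b1, List.length_append]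
      exact ih st.1 st.2 (cnt + 1) (min y mn) (max y mx) (insert (x, y) P) hinv' (by
        simp only [List.length_cons] at hfuel
        omega)

-- ===== bfs: full characterization =====

theorem pvBfs_spec (land : List (List Int)) (n m a b : Int)
    (visit : List (List Int)) (result : List Int)
    (hwf : WFv n m visit)
    (hoil : OilP land n m (a, b))
    (hnv : ¬ VisP n m visit (a, b))
    (hclosed : ∀ p, VisP n m visit p → ∀ w, AdjP land n m p w → VisP n m visit w) :
    ∃ (C : Finset (Int × Int)) (hne : ((insert (a, b) C).image Prod.snd).Nonempty),
      (∀ w, w ∈ C ↔ ReachP land n m (a, b) w) ∧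
      WFv n m (pvBfs land n m a b visit result).1 ∧
      (∀ p, VisP n m (pvBfs land n m a b visit result).1 p ↔
        VisP n m visit p ∨ p ∈ C) ∧
      insert (a, b) C = C ∧
      (pvBfs land n m a b visit result).2 =
        (PySem.List.pyRange (((insert (a, b) C).image Prod.snd).min' hne)
            (((insert (a, b) C).image Prod.snd).max' hne + 1) 1).foldl
          (fun res i => PySem.List.pySetD res i (PySem.List.pyGetD res i 0 + (C.card : Int)))
          result := by
  have hb1 : 0 ≤ a ∧ a < n ∧ 0 ≤ b ∧ b < m := by
    have := oil_mem_GridF land n m (a, b) hoil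
    simp only [GridF, Finset.mem_product, Finset.mem_Icc] at this
    omega
  have hwf1 : WFv n m (pvSet2 visit a b) := wf_pvSet2 n m visit a b hwf hb1.2.1
  have hvis1 : ∀ p, VisP n m (pvSet2 visit a b) p ↔ p = (a, b) ∨ VisP n m visit p :=
    fun p => visP_pvSet2 n m visit a b p hwf hb1.1 hb1.2.1 hb1.2.2.1 hb1.2.2.2
  have hinv : BfsInv land n m (a, b) (VisF n m visit) (pvSet2 visit a b)
      [(a, b)] 0 b b (∅ : Finset (Int × Int)) := by
    refine ⟨hwf1, ?_, List.nodup_singleton _, by simp, ?_, by simp, by simp, by simp, ?_, ?_, by simp⟩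
    · intro p
      rw [hvis1 p, mem_VisF]
      simp only [Finset.notMem_empty, List.mem_singleton]
      tauto
    · intro p hp
      rw [List.mem_singleton] at hp
      subst hp
      exact ⟨hoil, Relation.ReflTransGen.refl⟩
    · simp
    · simp
  have hfuel : ([(a, b)] : List (Int × Int)).length +
      ((GridF n m).card - (VisF n m (pvSet2 visit a b)).card) ≤ n.toNat * m.toNat + 1 := by
    have h1 : (GridF n m).card = n.toNat * m.toNat := card_GridF n m
    have : (GridF n m).card - (VisF n m (pvSet2 visit a b)).card ≤ (GridF n m).card :=
      Nat.sub_le _ _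
    simp only [List.length_singleton]
    omega
  obtain ⟨P', inv'⟩ := bfsLoop_spec land n m (a, b) (VisF n m visit)
    (n.toNat * m.toNat + 1) (pvSet2 visit a b) [(a, b)] 0 b b ∅ hinv hfuel
  obtain ⟨iwf, ivis, _, _, _, iP, icl, icnt, imn, imx, ivq⟩ := inv'
  have hvP : (a, b) ∈ P' := by
    rcases ivq with h | h
    · exact h
    · simp at h
  set r := pvBfsLoop land n m (n.toNat * m.toNat + 1) (pvSet2 visit a b) [(a, b)] 0 b b with hr
  -- the visited set after the loop
  have hCiff : ∀ w, w ∈ P' ↔ ReachP land n m (a, b) w := by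
    intro w
    constructor
    · intro hw
      exact (iP w hw).2
    · intro hreach
      induction hreach with
      | refl => exact hvP
      | @tail p w _ hadj ihp =>
        have hvisw := icl p ihp w hadj.2.1 hadj.2.2
        rcases (ivis w).mp hvisw with h | h | h
        · -- w already visited before the call: contradiction with closedness of V0
          exfalso
          have hvw : VisP n m visit w := (mem_VisF n m visit w).mp h
          have hreachw : ReachP land n m w (a, b) := by
            apply reachP_symm
            exact Relation.ReflTransGen.tail (by assumption) hadj
          exact hnv (closed_reach land n m _ hclosed w (a, b) hvw hreachw)
        · exact h
        · simp at h
    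
  have hins : insert (a, b) P' = P' := Finset.insert_eq_self.mpr hvP
  refine ⟨P', (Finset.insert_nonempty _ _).image Prod.snd, hCiff, ?_, ?_, hins, ?_⟩
  · show WFv n m r.1
    exact iwf
  · intro p
    show VisP n m r.1 p ↔ _
    rw [ivis p, mem_VisF]
    simp only [List.not_mem_nil, or_false]
  · show (r.1, (PySem.List.pyRange r.2.2.1 (r.2.2.2 + 1) 1).foldl _ result).2 = _
    simp only
    rw [imn, imx, icnt]

-- ===== min?/max? against Finset min'/max' =====

theorem min?_getD_eq_min' (l : List Int) (S : Finset Int) (hne : S.Nonempty)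
    (hiff : ∀ x, x ∈ l ↔ x ∈ S) :
    (PySem.List.min? l (fun y => y)).getD 0 = S.min' hne := by
  have hne' := hne
  obtain ⟨x, hx⟩ := hne'
  have hlne : l ≠ [] := by
    intro h
    rw [h] at hiff
    simp only [List.not_mem_nil, false_iff] at hiff
    exact hiff x hx
  obtain ⟨v, hv⟩ : ∃ v, PySem.List.min? l (fun y => y) = some v := by
    cases h : PySem.List.min? l (fun y => y) with
    | none => exact absurd ((PySem.List.min?_eq_none_iff l (fun y => y)).mp h) hlne
    | some v => exact ⟨v, rfl⟩
  rw [hv, Option.getD_some]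
  have hmem : v ∈ S := (hiff v).mp (PySem.List.min?_mem hv)
  have hlb : ∀ y ∈ S, v ≤ y := fun y hy => PySem.List.min?_isMin hv y ((hiff y).mpr hy)
  exact le_antisymm (Finset.le_min' S hne v hlb) (Finset.min'_le S v hmem)

theorem max?_getD_eq_max' (l : List Int) (S : Finset Int) (hne : S.Nonempty)
    (hiff : ∀ x, x ∈ l ↔ x ∈ S) :
    (PySem.List.max? l (fun y => y)).getD 0 = S.max' hne := by
  have hne' := hne
  obtain ⟨x, hx⟩ := hne'
  have hlne : l ≠ [] := by
    intro h
    rw [h] at hiff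
    simp only [List.not_mem_nil, false_iff] at hiff
    exact hiff x hx
  obtain ⟨v, hv⟩ : ∃ v, PySem.List.max? l (fun y => y) = some v := by
    cases h : PySem.List.max? l (fun y => y) with
    | none => exact absurd ((PySem.List.max?_eq_none_iff l (fun y => y)).mp h) hlne
    | some v => exact ⟨v, rfl⟩
  rw [hv, Option.getD_some]
  have hmem : v ∈ S := (hiff v).mp (PySem.List.max?_mem hv)
  have hub : ∀ y ∈ S, y ≤ v := fun y hy => PySem.List.max?_isMax hv y ((hiff y).mpr hy)
  exact le_antisymm (Finset.le_max' S v hmem) (Finset.max'_le S hne v hub)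

-- ===== outer scan: lockstep of A and B =====

theorem pvGet2_zero_or_one (n m : Int) (visit : List (List Int)) (hwf : WFv n m visit)
    (i j : Int) (hi : 0 ≤ i) (hi2 : i < n) (hj : 0 ≤ j) (hj2 : j < m) :
    pvGet2 visit i j = 0 ∨ pvGet2 visit i j = 1 := by
  obtain ⟨hlen, hrow⟩ := hwf
  have hilt : i.toNat < visit.length := by omega
  have hold := hrow _ (List.getElem_mem hilt)
  have hjlt : j.toNat < (visit[i.toNat]).length := by omega
  unfold pvGet2
  rw [List.getD_eq_getElem _ _ hilt, List.getD_eq_getElem _ _ hjlt]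
  exact hold.2 _ (List.getElem_mem hjlt)

def OutInv (land : List (List Int)) (n m : Int)
    (stA : List (List Int) × List Int) (stB : PySem.Set (Int × Int) × List Int) : Prop :=
  WFv n m stA.1 ∧ stB.1.Nodup ∧
  (∀ p, VisP n m stA.1 p ↔ p ∈ stB.1) ∧
  (∀ p ∈ stB.1, OilP land n m p) ∧
  (∀ p ∈ stB.1, ∀ w, AdjP land n m p w → w ∈ stB.1) ∧
  stA.2 = stB.2

theorem cell_step (land : List (List Int)) (n m i j : Int)
    (hi : 0 ≤ i) (hi2 : i < n) (hj : 0 ≤ j) (hj2 : j < m)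
    (stA : List (List Int) × List Int) (stB : PySem.Set (Int × Int) × List Int)
    (hinv : OutInv land n m stA stB) :
    OutInv land n m
      (if pvGet2 land i j = 1 ∧ pvGet2 stA.1 i j = 0 then
        pvBfs land n m i j stA.1 stA.2 else stA)
      (if pvGet2 land i j = 1 ∧ (i, j) ∉ stB.1 then
        (PySem.Set.union stB.1 (pvIter land n m (n.toNat * m.toNat) [(i, j)]),
         (PySem.List.pyRange
             ((PySem.List.min? ((pvIter land n m (n.toNat * m.toNat) [(i, j)]).map (·.2)) (fun y => y)).getD 0)
             ((PySem.List.max? ((pvIter land n m (n.toNat * m.toNat) [(i, j)]).map (·.2)) (fun y => y)).getD 0 + 1) 1).foldl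
           (fun res col => PySem.List.pySetD res col (PySem.List.pyGetD res col 0 +
             ((pvIter land n m (n.toNat * m.toNat) [(i, j)]).length : Int))) stB.2)
      else stB) := by
  obtain ⟨hwf, hnd, hvis, hoilB, hclB, hres⟩ := hinv
  have hguard : (pvGet2 land i j = 1 ∧ pvGet2 stA.1 i j = 0) ↔
      (pvGet2 land i j = 1 ∧ (i, j) ∉ stB.1) := by
    constructor
    · rintro ⟨h1, h2⟩
      refine ⟨h1, ?_⟩
      intro hmem
      have hvp := (hvis (i, j)).mpr hmem
      have h5 : pvGet2 stA.1 i j = 1 := hvp.2.2.2.2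
      omega
    · rintro ⟨h1, h2⟩
      refine ⟨h1, ?_⟩
      rcases pvGet2_zero_or_one n m stA.1 hwf i j hi hi2 hj hj2 with h | h
      · exact h
      · exfalso
        exact h2 ((hvis (i, j)).mp ⟨hi, hi2, hj, hj2, h⟩)
  by_cases hg : pvGet2 land i j = 1 ∧ pvGet2 stA.1 i j = 0
  · rw [if_pos hg, if_pos (hguard.mp hg)]
    have hoil : OilP land n m (i, j) := by
      rw [oilP_iff land n m i j hi hi2 hj hj2]
      exact hg.1
    have hnv : ¬ VisP n m stA.1 (i, j) := by
      intro hv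
      have h5 : pvGet2 stA.1 i j = 1 := hv.2.2.2.2
      omega
    have hclosedA : ∀ p, VisP n m stA.1 p → ∀ w, AdjP land n m p w → VisP n m stA.1 w := by
      intro p hp w hadj
      exact (hvis w).mpr (hclB p ((hvis p).mp hp) w hadj)
    obtain ⟨C, hneC, hCiff, jwf, jvis, hins, jres⟩ :=
      pvBfs_spec land n m i j stA.1 stA.2 hwf hoil hnv hclosedA
    obtain ⟨cnd, cmem⟩ := pvComp_spec land n m (i, j) hoil
    set c := pvIter land n m (n.toNat * m.toNat) [(i, j)] with hc
    have hcC : ∀ w, w ∈ c ↔ w ∈ C := by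
      intro w
      rw [cmem w, hCiff w]
    have hfinC : c.toFinset = C := by
      apply Finset.ext
      intro w
      rw [List.mem_toFinset, hcC]
    have hlenC : (c.length : Int) = (C.card : Int) := by
      rw [← hfinC, List.toFinset_card_of_nodup cnd]
    have hcolsIff : ∀ x, x ∈ c.map (·.2) ↔ x ∈ (insert (i, j) C).image Prod.snd := by
      intro x
      rw [hins]
      simp only [List.mem_map, Finset.mem_image]
      constructor
      · rintro ⟨w, hw, rfl⟩; exact ⟨w, (hcC w).mp hw, rfl⟩
      · rintro ⟨w, hw, rfl⟩; exact ⟨w, (hcC w).mpr hw, rfl⟩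
    have hmin : (PySem.List.min? (c.map (·.2)) (fun y => y)).getD 0 =
        ((insert (i, j) C).image Prod.snd).min' hneC :=
      min?_getD_eq_min' _ _ hneC hcolsIff
    have hmax : (PySem.List.max? (c.map (·.2)) (fun y => y)).getD 0 =
        ((insert (i, j) C).image Prod.snd).max' hneC :=
      max?_getD_eq_max' _ _ hneC hcolsIff
    refine ⟨jwf, PySem.Set.nodup_union _ _ hnd, ?_, ?_, ?_, ?_⟩
    · intro p
      rw [jvis p, PySem.Set.mem_union, hvis p, hcC p]
    · intro p hp
      rcases (PySem.Set.mem_union _ _ p).mp hp with h | h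
      · exact hoilB p h
      · exact reach_oil land n m (i, j) p hoil ((cmem p).mp h)
    · intro p hp w hadj
      rw [PySem.Set.mem_union]
      rcases (PySem.Set.mem_union _ _ p).mp hp with h | h
      · exact Or.inl (hclB p h w hadj)
      · right
        rw [cmem w]
        exact Relation.ReflTransGen.tail ((cmem p).mp h) hadj
    · rw [jres, hres, hmin, hmax, hlenC]
  · rw [if_neg hg, if_neg (fun h => hg (hguard.mpr h))]
    exact ⟨hwf, hnd, hvis, hoilB, hclB, hres⟩

theorem inner_fold (land : List (List Int)) (n m i : Int) (hi : 0 ≤ i) (hi2 : i < n) :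
    ∀ (js : List Int) (stA : List (List Int) × List Int)
      (stB : PySem.Set (Int × Int) × List Int),
    (∀ j ∈ js, 0 ≤ j ∧ j < m) → OutInv land n m stA stB →
    OutInv land n m
      (js.foldl (fun st j => if pvGet2 land i j = 1 ∧ pvGet2 st.1 i j = 0 then
        pvBfs land n m i j st.1 st.2 else st) stA)
      (js.foldl (fun st j => if pvGet2 land i j = 1 ∧ (i, j) ∉ st.1 then
        (PySem.Set.union st.1 (pvIter land n m (n.toNat * m.toNat) [(i, j)]),
         (PySem.List.pyRange
             ((PySem.List.min? ((pvIter land n m (n.toNat * m.toNat) [(i, j)]).map (·.2)) (fun y => y)).getD 0)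
             ((PySem.List.max? ((pvIter land n m (n.toNat * m.toNat) [(i, j)]).map (·.2)) (fun y => y)).getD 0 + 1) 1).foldl
           (fun res col => PySem.List.pySetD res col (PySem.List.pyGetD res col 0 +
             ((pvIter land n m (n.toNat * m.toNat) [(i, j)]).length : Int))) st.2)
        else st) stB) := by
  intro js
  induction js with
  | nil => intro stA stB _ hinv; exact hinv
  | cons j js ih =>
    intro stA stB hbnd hinv
    simp only [List.foldl_cons]
    exact ih _ _ (fun j' hj' => hbnd j' (List.mem_cons_of_mem _ hj'))
      (cell_step land n m i j hi hi2 (hbnd j (by simp)).1 (hbnd j (by simp)).2 stA stB hinv)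

theorem outer_fold (land : List (List Int)) (n m : Int) :
    ∀ (is : List Int) (stA : List (List Int) × List Int)
      (stB : PySem.Set (Int × Int) × List Int),
    (∀ i ∈ is, 0 ≤ i ∧ i < n) → OutInv land n m stA stB →
    OutInv land n m
      (is.foldl (fun st i => (PySem.List.pyRange 0 m 1).foldl
        (fun st j => if pvGet2 land i j = 1 ∧ pvGet2 st.1 i j = 0 then
          pvBfs land n m i j st.1 st.2 else st) st) stA)
      (is.foldl (fun st i => (PySem.List.pyRange 0 m 1).foldl
        (fun st j => if pvGet2 land i j = 1 ∧ (i, j) ∉ st.1 then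
          (PySem.Set.union st.1 (pvIter land n m (n.toNat * m.toNat) [(i, j)]),
           (PySem.List.pyRange
               ((PySem.List.min? ((pvIter land n m (n.toNat * m.toNat) [(i, j)]).map (·.2)) (fun y => y)).getD 0)
               ((PySem.List.max? ((pvIter land n m (n.toNat * m.toNat) [(i, j)]).map (·.2)) (fun y => y)).getD 0 + 1) 1).foldl
             (fun res col => PySem.List.pySetD res col (PySem.List.pyGetD res col 0 +
               ((pvIter land n m (n.toNat * m.toNat) [(i, j)]).length : Int))) st.2)
          else st) st) stB) := by
  intro is
  induction is with
  | nil => intro stA stB _ hinv; exact hinv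
  | cons i is ih =>
    intro stA stB hbnd hinv
    simp only [List.foldl_cons]
    refine ih _ _ (fun i' hi' => hbnd i' (List.mem_cons_of_mem _ hi')) ?_
    apply inner_fold land n m i (hbnd i (by simp)).1 (hbnd i (by simp)).2
    · intro j hj
      have := PySem.List.mem_pyRange_one.mp hj
      omega
    · exact hinv

theorem solution_eq (land : List (List Int)) : solution land = solution_alt land := by
  have hinit : OutInv land (land.length : Int) ((land.headD []).length : Int)
      (List.replicate (land.length : Int).toNat
        (List.replicate ((land.headD []).length : Int).toNat (0 : Int)),
       List.replicate (((land.headD []).length : Int).toNat + 1) (0 : Int))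
      (([] : PySem.Set (Int × Int)),
       List.replicate (((land.headD []).length : Int).toNat + 1) (0 : Int)) := by
    refine ⟨wf_visit0 _ _, List.nodup_nil, ?_, by simp, by simp, rfl⟩
    intro p
    simp only [List.not_mem_nil, iff_false]
    exact not_visP_visit0 _ _ p
  have hout := outer_fold land (land.length : Int) ((land.headD []).length : Int)
    (PySem.List.pyRange 0 (land.length : Int) 1) _ _
    (fun i hi => by
      have := PySem.List.mem_pyRange_one.mp hi
      omega) hinit
  unfold solution solution_alt
  simp only
  exact congrArg (fun l => (PySem.List.max? l (fun y => y)).getD 0) hout.2.2.2.2.2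


-- ===== VERDICT (by name: the statement is the Claim_ definition above) =====
theorem solution_spec : Claim_equal_solution := by
  intro land _ _
  exact solution_eq land
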